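-- pv_equiv track=rewrite | github.com/thesolari21/Laczkers | laczkerscup/szwajcar_logika.py | _wybierz_bye
-- ===== SOURCE A (Python) =====
-- def _wybierz_bye(ids, bye_historia):
--     """
--     Wybierz gracza na BYE.
--     Priorytet: kto najdawniej (lub nigdy) miał BYE,
--     a jeśli remis — gracz z najniższego miejsca (ostatni na liście).
--     """
--     # Indeks ostatniego BYE dla każdego gracza (-1 = nigdy nie miał)
--     def ostatni_bye(gid):
--         for i in range(len(bye_historia) - 1, -1, -1):
--             if bye_historia[i] == gid:
--                 return i
--         return -1
--
--     # Sortuj: najpierw ten kto najdawniej miał BYE, przy remisie — ostatni na liście (słabszy)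
--     kandydaci = sorted(ids, key=lambda gid: (ostatni_bye(gid), -ids.index(gid)))
--     return kandydaci[0]
-- ===== SOURCE B (Python) =====
-- def _wybierz_bye(ids, bye_historia):
--     # Build each gid's last-BYE index once (forward pass, later writes win),
--     # and each gid's first position in ids; then select the argmin in one walk.
--     last = {}
--     for i, g in enumerate(bye_historia):
--         last[g] = i
--     first = {}
--     for i, g in enumerate(ids):
--         if g not in first:
--             first[g] = i
--     best = ids[0]
--     best_key = (last.get(best, -1), -first[best])
--     for g in ids[1:]:
--         key = (last.get(g, -1), -first[g])
--         if key < best_key: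
--             best = g
--             best_key = key
--     return best
-- ===== Notes on version B (the rewrite author's own statement) =====
-- stated objective: faster
-- what changed: B precomputes one dict of each gid's last BYE index and one dict of first positions in a single pass each, then picks the argmin in one walk with strict-< replacement, instead of A's per-element reverse scan of bye_historia plus ids.index inside a full sort.
import Mathlib
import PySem

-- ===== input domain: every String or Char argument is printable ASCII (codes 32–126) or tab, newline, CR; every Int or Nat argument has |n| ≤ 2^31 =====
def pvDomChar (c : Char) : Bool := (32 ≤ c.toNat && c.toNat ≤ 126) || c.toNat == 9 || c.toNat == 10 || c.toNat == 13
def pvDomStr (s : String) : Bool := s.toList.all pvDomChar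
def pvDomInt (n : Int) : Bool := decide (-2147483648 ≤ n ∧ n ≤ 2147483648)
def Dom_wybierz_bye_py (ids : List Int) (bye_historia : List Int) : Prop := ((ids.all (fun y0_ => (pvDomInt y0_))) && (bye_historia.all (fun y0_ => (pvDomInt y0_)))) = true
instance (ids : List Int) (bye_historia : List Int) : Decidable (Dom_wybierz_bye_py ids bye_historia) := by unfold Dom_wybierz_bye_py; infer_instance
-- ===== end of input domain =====

-- B replaces A's per-gid reverse scan + ids.index inside a sort by two precomputed
-- dicts (last BYE index, first position in ids) and a single argmin pass.


-- ===== PORT A =====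
-- the countdown for-loop of ostatni_bye with early return; indices come from
-- range(len(bye_historia)-1, -1, -1) and are always in range, so pyGetD is exact here
def ostatniByeGo (bye : List Int) (gid : Int) : List Int → Int
  | [] => -1
  | i :: rest => if PySem.List.pyGetD bye i 0 = gid then i else ostatniByeGo bye gid rest

def wybierz_bye_py (ids : List Int) (bye_historia : List Int) : Int :=
  let ostatni_bye := fun gid =>
    ostatniByeGo bye_historia gid (PySem.List.pyRange ((bye_historia.length : Int) - 1) (-1) (-1))
  -- ids.index(gid) is only evaluated at gid ∈ ids, where index? is some; the getD 0 never fires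
  let kandydaci := PySem.List.sorted2 ids ostatni_bye
      (fun gid => -((((PySem.List.index? ids gid).getD 0) : Nat) : Int))
  PySem.List.pyGetD kandydaci 0 0   -- kandydaci[0]; IndexError on empty ids is excluded by Pre_

-- ===== PORT B =====
def lastDict (bye : List Int) : PySem.Dict Int Int :=
  (PySem.List.enumerate bye 0).foldl (fun d p => d.insert p.2 p.1) PySem.Dict.empty

def firstDict (ids : List Int) : PySem.Dict Int Int :=
  (PySem.List.enumerate ids 0).foldl
    (fun d p => if d.contains p.2 then d else d.insert p.2 p.1) PySem.Dict.empty

def wybierz_bye_py_alt (ids : List Int) (bye_historia : List Int) : Int :=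
  let last := lastDict bye_historia
  let first := firstDict ids
  let key := fun g => ((last.getD g (-1)), -(first.getD g 0))
  match ids with
  | [] => 0        -- Python raises IndexError here; outside Pre_
  | b :: rest =>
    -- Python tuple < is lexicographic; written out componentwise
    (rest.foldl (fun (st : Int × Int × Int) g =>
        let k := key g
        if k.1 < st.2.1 ∨ (k.1 = st.2.1 ∧ k.2 < st.2.2) then (g, k) else st)
      (b, key b)).1

-- ===== PRECONDITION & SPEC =====
-- Pre_ excludes only empty ids, on which both A and B raise IndexError
def Pre_wybierz_bye_py (ids : List Int) (bye_historia : List Int) : Prop := ids ≠ []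
instance (ids : List Int) (bye_historia : List Int) : Decidable (Pre_wybierz_bye_py ids bye_historia) := by unfold Pre_wybierz_bye_py; infer_instance
def pvWitness_wybierz_bye_py : List Int × List Int := ([1, 2, 3], [2])

def Spec_wybierz_bye_py (ids : List Int) (bye_historia : List Int) (out : Int) : Prop := out = wybierz_bye_py_alt ids bye_historia
instance (ids : List Int) (bye_historia : List Int) (out : Int) : Decidable (Spec_wybierz_bye_py ids bye_historia out) := by unfold Spec_wybierz_bye_py; infer_instance

-- ===== CLAIM (what is proved, stated in full; the proofs are below) =====
def Claim_equal_wybierz_bye_py : Prop := ∀ (ids : List Int) (bye_historia : List Int), Dom_wybierz_bye_py ids bye_historia → Pre_wybierz_bye_py ids bye_historia → Spec_wybierz_bye_py ids bye_historia (wybierz_bye_py ids bye_historia)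

-- ===== LEMMAS AND PROOFS =====

-- lexicographic order on Int pairs (A's tuple-key order; B tests it componentwise)
def lexLt (p q : Int × Int) : Prop := p.1 < q.1 ∨ (p.1 = q.1 ∧ p.2 < q.2)
def lexLe (p q : Int × Int) : Prop := p.1 < q.1 ∨ (p.1 = q.1 ∧ p.2 ≤ q.2)

theorem lexLe_refl (p : Int × Int) : lexLe p p := Or.inr ⟨rfl, le_refl _⟩

theorem lexLe_trans {p q r : Int × Int} (h1 : lexLe p q) (h2 : lexLe q r) : lexLe p r := by
  unfold lexLe at *
  rcases h1 with h1 | ⟨e1, h1⟩ <;> rcases h2 with h2 | ⟨e2, h2⟩ <;>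
    first | (left; omega) | (right; constructor <;> omega)

theorem lexLt_le {p q : Int × Int} (h : lexLt p q) : lexLe p q := by
  unfold lexLt at h; unfold lexLe
  rcases h with h | ⟨e, h⟩
  · exact Or.inl h
  · exact Or.inr ⟨e, le_of_lt h⟩

theorem not_lexLt {p q : Int × Int} (h : ¬ lexLt p q) : lexLe q p := by
  unfold lexLt at h; unfold lexLe
  by_cases h1 : q.1 < p.1
  · exact Or.inl h1
  · right; constructor <;> omega

theorem lexLe_antisymm {p q : Int × Int} (h1 : lexLe p q) (h2 : lexLe q p) : p = q := by
  unfold lexLe at *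
  have : p.1 = q.1 ∧ p.2 = q.2 := by
    rcases h1 with h1 | ⟨e1, h1⟩ <;> rcases h2 with h2 | ⟨e2, h2⟩ <;> constructor <;> omega
  exact Prod.ext this.1 this.2

-- the strict comparator sorted2 builds is exactly lexLt on the key pairs
theorem before_eq_lexLt (k1 k2 : Int → Int) (a b : Int) :
    ((decide (k1 a < k1 b) || (!decide (k1 b < k1 a) && decide (k2 a < k2 b))) = true)
      ↔ lexLt (k1 a, k2 a) (k1 b, k2 b) := by
  unfold lexLt; simp; omega

-- "head is a lexLe-minimum of the list" invariant
def HeadMin (key : Int → Int × Int) : List Int → Prop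
  | [] => True
  | h :: t => ∀ y ∈ h :: t, lexLe (key h) (key y)

theorem headMin_insertBy (k1 k2 : Int → Int) (x : Int) (acc : List Int)
    (h : HeadMin (fun g => (k1 g, k2 g)) acc) :
    HeadMin (fun g => (k1 g, k2 g))
      (PySem.List.insertBy
        (fun a b => decide (k1 a < k1 b) || (!decide (k1 b < k1 a) && decide (k2 a < k2 b))) x acc) := by
  cases acc with
  | nil =>
    intro z hz
    rw [List.mem_singleton] at hz
    subst hz
    exact lexLe_refl _
  | cons y ys =>
    by_cases hb : (decide (k1 x < k1 y) || (!decide (k1 y < k1 x) && decide (k2 x < k2 y))) = true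
    · simp only [PySem.List.insertBy, hb, if_pos]
      intro z hz
      rcases List.mem_cons.mp hz with rfl | hz
      · exact lexLe_refl _
      · exact lexLe_trans (lexLt_le ((before_eq_lexLt k1 k2 x y).mp hb)) (h z hz)
    · simp only [PySem.List.insertBy, hb, if_false, Bool.false_eq_true]
      intro z hz
      rcases List.mem_cons.mp hz with rfl | hz
      · exact lexLe_refl _
      · rcases (PySem.List.mem_insertBy _ x z ys).mp hz with rfl | hz
        · exact not_lexLt (fun hl => hb ((before_eq_lexLt k1 k2 z y).mpr hl))
        · exact h z (List.mem_cons_of_mem _ hz)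

theorem headMin_foldl (k1 k2 : Int → Int) (xs : List Int) (acc : List Int)
    (h : HeadMin (fun g => (k1 g, k2 g)) acc) :
    HeadMin (fun g => (k1 g, k2 g))
      (xs.foldl (fun acc x => PySem.List.insertBy
        (fun a b => decide (k1 a < k1 b) || (!decide (k1 b < k1 a) && decide (k2 a < k2 b))) x acc) acc) := by
  induction xs generalizing acc with
  | nil => exact h
  | cons x t ih => exact ih _ (headMin_insertBy k1 k2 x acc h)

-- head of A's sorted2 is in ids and lexLe-minimal over ids
theorem sorted2_head_min (ids : List Int) (k1 k2 : Int → Int) (m : Int) (t : List Int)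
    (hs : PySem.List.sorted2 ids k1 k2 = m :: t) :
    m ∈ ids ∧ ∀ y ∈ ids, lexLe (k1 m, k2 m) (k1 y, k2 y) := by
  have hperm := PySem.List.sorted2_perm ids k1 k2 false
  rw [hs] at hperm
  have hmem : ∀ y, y ∈ ids ↔ y ∈ m :: t := fun y => (hperm.mem_iff).symm
  have hmin : HeadMin (fun g => (k1 g, k2 g)) (m :: t) := by
    have h0 := headMin_foldl k1 k2 ids [] trivial
    have he : (ids.foldl (fun acc x => PySem.List.insertBy
        (fun a b => decide (k1 a < k1 b) || (!decide (k1 b < k1 a) && decide (k2 a < k2 b))) x acc) [])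
        = PySem.List.sorted2 ids k1 k2 := rfl
    rwa [he, hs] at h0
  exact ⟨(hmem m).mpr List.mem_cons_self, fun y hy => hmin y ((hmem y).mp hy)⟩

-- ===== bridging the key functions =====

-- appending a last element does not change A's scan over indices below xs.length
theorem ostatniByeGo_append (xs : List Int) (x gid : Int) (l : List Int)
    (h : ∀ i ∈ l, 0 ≤ i ∧ i < (xs.length : Int)) :
    ostatniByeGo (xs ++ [x]) gid l = ostatniByeGo xs gid l := by
  induction l with
  | nil => rfl
  | cons i rest ih =>
    have hi := h i List.mem_cons_self
    have hget : PySem.List.pyGetD (xs ++ [x]) i 0 = PySem.List.pyGetD xs i 0 := by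
      rw [PySem.List.pyGetD_eq_getElem _ 0 hi.1 (by simp; omega),
          PySem.List.pyGetD_eq_getElem _ 0 hi.1 (by exact_mod_cast hi.2)]
      exact List.getElem_append_left (by omega)
    simp only [ostatniByeGo, hget]
    split
    · rfl
    · exact ih (fun j hj => h j (List.mem_cons_of_mem _ hj))

-- A's countdown scan equals B's last-BYE dict lookup
theorem ostatni_eq_lastDict (bye : List Int) (gid : Int) :
    ostatniByeGo bye gid (PySem.List.pyRange ((bye.length : Int) - 1) (-1) (-1))
      = (lastDict bye).getD gid (-1) := by
  induction bye using List.reverseRecOn with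
  | nil =>
    rw [PySem.List.pyRange_neg_one_eq_nil (by simp)]
    simp [ostatniByeGo, lastDict, PySem.List.enumerate, PySem.Dict.getD_empty]
  | append_singleton xs x ih =>
    have hlen : ((xs ++ [x]).length : Int) - 1 = (xs.length : Int) := by simp
    rw [hlen, PySem.List.pyRange_neg_one_cons (by omega)]
    have hget : PySem.List.pyGetD (xs ++ [x]) (xs.length : Int) 0 = x := by
      rw [PySem.List.pyGetD_eq_getElem _ 0 (by omega) (by simp)]
      simp
    have hrec : ostatniByeGo (xs ++ [x]) gid (PySem.List.pyRange ((xs.length : Int) - 1) (-1) (-1))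
        = ostatniByeGo xs gid (PySem.List.pyRange ((xs.length : Int) - 1) (-1) (-1)) := by
      apply ostatniByeGo_append
      intro i hi
      have := (PySem.List.mem_pyRange_neg_one).mp hi
      omega
    have hdict : lastDict (xs ++ [x]) = (lastDict xs).insert x (xs.length : Int) := by
      unfold lastDict
      rw [PySem.List.enumerate_append, List.foldl_append]
      simp [PySem.List.enumerate]
    simp only [ostatniByeGo, hget, hrec, ih, hdict, PySem.Dict.getD_insert]
    by_cases hx : x = gid
    · subst hx; simp
    · rw [if_neg hx, if_neg (fun h => hx h.symm)]

-- B's first-position dict lookup equals ids.index, generalized over offset and accumulator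
theorem get?_firstAux (l : List Int) : ∀ (s : Int) (d : PySem.Dict Int Int) (g : Int),
    ((PySem.List.enumerate l s).foldl
        (fun d p => if d.contains p.2 then d else d.insert p.2 p.1) d).get? g
      = (d.get? g).or ((PySem.List.index? l g).map (fun k => s + (k : Int))) := by
  induction l with
  | nil => intro s d g; simp [PySem.List.enumerate]
  | cons x l ih =>
    intro s d g
    rw [PySem.List.enumerate_cons]
    simp only [List.foldl_cons]
    by_cases hc : d.contains x
    · simp only [hc, if_true]
      rw [ih]
      by_cases hg : g = x
      · subst hg
        have : (d.get? g).isSome := by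
          rw [← PySem.Dict.contains_eq_isSome_get?]; exact hc
        obtain ⟨v, hv⟩ := Option.isSome_iff_exists.mp this
        simp [hv]
      · rw [PySem.List.index?_cons_of_ne _ (fun h => hg h.symm)]
        cases PySem.List.index? l g with
        | none => simp
        | some k => simp; congr 1; omega
    · simp only [hc, if_false, Bool.false_eq_true]
      rw [ih]
      by_cases hg : g = x
      · subst hg
        have hnone : d.get? g = none := by
          rcases h : d.get? g with _ | v
          · rfl
          · exfalso
            have : d.contains g = (d.get? g).isSome := PySem.Dict.contains_eq_isSome_get? d g
            rw [h] at this; simp at this; exact hc (by rw [this])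
        rw [PySem.Dict.get?_insert, if_pos rfl, hnone]
        rw [PySem.List.index?_cons_self]
        simp
      · rw [PySem.Dict.get?_insert, if_neg hg, PySem.List.index?_cons_of_ne _ (fun h => hg h.symm)]
        cases PySem.List.index? l g with
        | none => simp
        | some k => simp; congr 1; omega

theorem firstDict_eq_index (ids : List Int) (g : Int) (hg : g ∈ ids) :
    ∃ k : Nat, PySem.List.index? ids g = some k ∧ (firstDict ids).getD g 0 = (k : Int) := by
  have hs : (PySem.List.index? ids g).isSome := (PySem.List.index?_isSome_iff ids g).mpr hg
  obtain ⟨k, hk⟩ := Option.isSome_iff_exists.mp hs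
  refine ⟨k, hk, ?_⟩
  have := get?_firstAux ids 0 PySem.Dict.empty g
  rw [PySem.Dict.get?_empty, hk] at this
  simp only [Option.or, Option.map] at this
  rw [PySem.Dict.getD_eq_get?_getD]
  unfold firstDict
  rw [this]
  simp

-- B's selection loop: result carries its own key, is drawn from the candidates,
-- and is a lexLe-minimum of everything seen
theorem argmin_foldl (key : Int → Int × Int) (l : List Int) :
    ∀ (b0 : Int),
    let r := l.foldl (fun (st : Int × Int × Int) g =>
        let k := key g
        if k.1 < st.2.1 ∨ (k.1 = st.2.1 ∧ k.2 < st.2.2) then (g, k) else st) (b0, key b0)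
    (r.1 = b0 ∨ r.1 ∈ l) ∧ lexLe (key r.1) (key b0) ∧ ∀ y ∈ l, lexLe (key r.1) (key y) := by
  induction l with
  | nil => intro b0; exact ⟨Or.inl rfl, lexLe_refl _, by simp⟩
  | cons x l ih =>
    intro b0
    simp only [List.foldl_cons]
    by_cases hlt : (key x).1 < (key b0).1 ∨ ((key x).1 = (key b0).1 ∧ (key x).2 < (key b0).2)
    · have hstep : (if (key x).1 < (b0, key b0).2.1 ∨ ((key x).1 = (b0, key b0).2.1 ∧ (key x).2 < (b0, key b0).2.2)
          then (x, key x) else (b0, key b0)) = (x, key x) := if_pos hlt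
      rw [hstep]
      obtain ⟨hmem, hle, hall⟩ := ih x
      refine ⟨Or.inr ?_, ?_, ?_⟩
      · rcases hmem with h | h
        · rw [h]; exact List.mem_cons_self
        · exact List.mem_cons_of_mem _ h
      · exact lexLe_trans hle (lexLt_le hlt)
      · intro y hy
        rcases List.mem_cons.mp hy with rfl | hy
        · exact hle
        · exact hall y hy
    · have hstep : (if (key x).1 < (b0, key b0).2.1 ∨ ((key x).1 = (b0, key b0).2.1 ∧ (key x).2 < (b0, key b0).2.2)
          then (x, key x) else (b0, key b0)) = (b0, key b0) := if_neg hlt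
      rw [hstep]
      obtain ⟨hmem, hle, hall⟩ := ih b0
      refine ⟨?_, hle, ?_⟩
      · rcases hmem with h | h
        · exact Or.inl h
        · exact Or.inr (List.mem_cons_of_mem _ h)
      intro y hy
      rcases List.mem_cons.mp hy with rfl | hy
      · exact lexLe_trans hle (not_lexLt hlt)
      · exact hall y hy

-- two members of ids with equal (negated) first positions are the same value
theorem eq_of_index_eq (ids : List Int) (a b : Int) (ka kb : Nat) (hka : PySem.List.index? ids a = some ka)
    (hkb : PySem.List.index? ids b = some kb) (h : (ka : Int) = (kb : Int)) : a = b := by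
  have hk : ka = kb := by exact_mod_cast h
  subst hk
  obtain ⟨h1, h2, _⟩ := PySem.List.getElem_of_index?_eq_some hka
  obtain ⟨h1', h2', _⟩ := PySem.List.getElem_of_index?_eq_some hkb
  rw [← h2, ← h2']

-- ===== VERDICT (by name: the statement is the Claim_ definition above) =====
theorem wybierz_bye_py_spec : Claim_equal_wybierz_bye_py := by
  intro ids bye _hdom hpre
  unfold Spec_wybierz_bye_py
  -- name the two key functions
  set kA : Int → Int × Int := fun g =>
    (ostatniByeGo bye g (PySem.List.pyRange ((bye.length : Int) - 1) (-1) (-1)),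
     -((((PySem.List.index? ids g).getD 0) : Nat) : Int)) with hkA
  set kB : Int → Int × Int := fun g =>
    ((lastDict bye).getD g (-1), -((firstDict ids).getD g 0)) with hkB
  have hkey : ∀ g ∈ ids, kA g = kB g := by
    intro g hg
    obtain ⟨k, hk, hD⟩ := firstDict_eq_index ids g hg
    simp only [hkA, hkB, ostatni_eq_lastDict, hk, hD, Option.getD]
  -- A's side: head of the sort
  obtain ⟨b, rest, rfl⟩ : ∃ b rest, ids = b :: rest := by
    cases ids with
    | nil => exact absurd rfl hpre
    | cons b rest => exact ⟨b, rest, rfl⟩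
  obtain ⟨m, t, hs⟩ : ∃ m t, PySem.List.sorted2 (b :: rest)
      (fun g => ostatniByeGo bye g (PySem.List.pyRange ((bye.length : Int) - 1) (-1) (-1)))
      (fun g => -((((PySem.List.index? (b :: rest) g).getD 0) : Nat) : Int)) = m :: t := by
    cases h : PySem.List.sorted2 (b :: rest)
      (fun g => ostatniByeGo bye g (PySem.List.pyRange ((bye.length : Int) - 1) (-1) (-1)))
      (fun g => -((((PySem.List.index? (b :: rest) g).getD 0) : Nat) : Int)) with
    | nil =>
      have := PySem.List.sorted2_perm (b :: rest)
        (fun g => ostatniByeGo bye g (PySem.List.pyRange ((bye.length : Int) - 1) (-1) (-1)))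
        (fun g => -((((PySem.List.index? (b :: rest) g).getD 0) : Nat) : Int)) false
      rw [h] at this
      exact absurd this.symm.eq_nil (by simp)
    | cons m t => exact ⟨m, t, rfl⟩
  have hA : wybierz_bye_py (b :: rest) bye = m := by
    show PySem.List.pyGetD (PySem.List.sorted2 (b :: rest)
      (fun g => ostatniByeGo bye g (PySem.List.pyRange ((bye.length : Int) - 1) (-1) (-1)))
      (fun g => -((((PySem.List.index? (b :: rest) g).getD 0) : Nat) : Int))) 0 0 = m
    rw [hs]
    simp [PySem.List.pyGetD]
  obtain ⟨hmmem, hmmin⟩ := sorted2_head_min _ _ _ _ _ hs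
  -- B's side: the argmin fold
  obtain ⟨hrmem, hrle, hrall⟩ := argmin_foldl kB rest b
  set r := rest.foldl (fun (st : Int × Int × Int) g =>
      let k := kB g
      if k.1 < st.2.1 ∨ (k.1 = st.2.1 ∧ k.2 < st.2.2) then (g, k) else st) (b, kB b) with hr
  have hB : wybierz_bye_py_alt (b :: rest) bye = r.1 := rfl
  have hrmem' : r.1 ∈ b :: rest := by
    rcases hrmem with h | h
    · rw [h]; exact List.mem_cons_self
    · exact List.mem_cons_of_mem _ h
  have hrmin : ∀ y ∈ b :: rest, lexLe (kB r.1) (kB y) := by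
    intro y hy
    rcases List.mem_cons.mp hy with rfl | hy
    · exact hrle
    · exact hrall y hy
  -- the two minima have equal keys, hence (via the position component) are equal
  have h1 : lexLe (kA m) (kA r.1) := hmmin r.1 hrmem'
  have h2 : lexLe (kA r.1) (kA m) := by
    rw [hkey r.1 hrmem', hkey m hmmem]
    exact hrmin m hmmem
  have heq : kA m = kA r.1 := lexLe_antisymm h1 h2
  obtain ⟨km, hkm, _⟩ := firstDict_eq_index (b :: rest) m hmmem
  obtain ⟨kr, hkr, _⟩ := firstDict_eq_index (b :: rest) r.1 hrmem'
  have hsnd : (kA m).2 = (kA r.1).2 := by rw [heq]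
  simp only [hkA, hkm, hkr, Option.getD, neg_inj] at hsnd
  have : m = r.1 := eq_of_index_eq (b :: rest) m r.1 km kr hkm hkr hsnd
  rw [hA, hB, this]
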